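-- pv_equiv track=rewrite | github.com/qifanyyy/JupyterNotebook | new_algs/Number+theoretic+algorithms/Multiplication+algorithms/DEEPAK KUMAR_2019418_BOOTH'S ALGORITHM_CODE.py | binary_bit_flip
-- ===== SOURCE A (Python) =====
-- def convert_to_binary(number,length = 8):
--     adder = "0"*length
--     summer = ""
--     while(number > 0):
--         summer = summer + str(int(number%2))
--         number = int(number/2)
--     summer = (((adder + summer[::-1])[::-1])[:length])[::-1]
--     return summer
--
-- def binary_bit_flip(binary):
--     binary = convert_to_binary(binary)
--     empty = ""
--     for i in range(len(binary)):
--         character = binary[i]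
--         if(character == "1"):
--             empty = empty + "0"
--         else:
--             empty = empty + "1"
--     return empty
-- ===== SOURCE B (Python) =====
-- def binary_bit_flip(binary):
--     # closed form: low 8 bits of positive inputs (else 0), flipped = 255 - v
--     v = binary % 256 if binary > 0 else 0
--     return format(255 - v, '08b')
-- ===== Notes on version B (the rewrite author's own statement) =====
-- stated objective: simpler
-- what changed: Replaces the digit-accumulation while loop, the four-step reverse/pad/slice string pipeline and the per-character flip loop with a single closed-form expression: take the low eight bits of a positive input (zero otherwise), complement them arithmetically, and format the result as a fixed-width binary string.
import Mathlib
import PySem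

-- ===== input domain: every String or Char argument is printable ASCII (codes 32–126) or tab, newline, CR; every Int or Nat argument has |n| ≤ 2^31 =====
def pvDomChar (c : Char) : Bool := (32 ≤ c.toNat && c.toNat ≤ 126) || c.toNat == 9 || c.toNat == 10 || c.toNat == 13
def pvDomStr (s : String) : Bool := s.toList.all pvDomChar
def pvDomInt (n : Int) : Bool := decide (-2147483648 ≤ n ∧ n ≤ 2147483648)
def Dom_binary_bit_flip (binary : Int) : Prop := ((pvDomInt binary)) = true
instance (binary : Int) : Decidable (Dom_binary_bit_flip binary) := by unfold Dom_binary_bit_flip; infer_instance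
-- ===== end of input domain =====

-- B replaces A's digit-accumulation loop, reverse/pad/slice pipeline and per-character
-- flip loop with the closed form format(255 - (n % 256 if n > 0 else 0), '08b'); objective: simpler.


-- ===== PORT A =====
-- while(number > 0): summer = summer + str(int(number%2)); number = int(number/2)
-- int(number/2) truncates float division toward zero; on the positive values the loop
-- sees (≤ 2^31 < 2^53, float-exact) this equals floor division, ported as floordiv.
def convLoop (number : Int) (summer : String) : String :=
  if h : number > 0 then
    convLoop (PySem.Int.floordiv number 2)
      (summer ++ PySem.Int.toStr (PySem.Int.mod number 2))
  else summer
termination_by number.toNat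
decreasing_by
  rw [PySem.Int.floordiv_eq_ediv_of_pos (by omega)]
  omega

def convert_to_binary (number : Int) : String :=
  let adder : String := "00000000"                   -- "0" * 8
  let summer := convLoop number ""                   -- the while loop
  -- summer = (((adder + summer[::-1])[::-1])[:length])[::-1]  ([::-1] is exact reversal)
  let t1 := adder ++ String.ofList summer.toList.reverse
  let t2 := String.ofList t1.toList.reverse
  let t3 := String.ofList (PySem.List.slice t2.toList none (some 8))
  String.ofList t3.toList.reverse

def binary_bit_flip (binary : Int) : String :=
  let b := convert_to_binary binary
  -- for i in range(len(b)): reading b[i] in index order ≡ folding over b's characters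
  b.toList.foldl
    (fun empty character => if character == '1' then empty ++ "0" else empty ++ "1") ""

-- ===== PORT B =====
-- format(m, '08b') for 0 ≤ m < 256: the 8 bits of m, most significant first
def fmt08b (m : Int) : String :=
  String.ofList ((List.range 8).reverse.map (fun k => if m / 2 ^ k % 2 = 1 then '1' else '0'))

def binary_bit_flip_alt (binary : Int) : String :=
  let v : Int := if binary > 0 then PySem.Int.mod binary 256 else 0
  fmt08b (255 - v)

-- ===== PRECONDITION & SPEC =====
def Spec_binary_bit_flip (binary : Int) (out : String) : Prop := out = binary_bit_flip_alt binary
instance (binary : Int) (out : String) : Decidable (Spec_binary_bit_flip binary out) := by unfold Spec_binary_bit_flip; infer_instance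

-- ===== CLAIM (what is proved, stated in full; the proofs are below) =====
def Claim_equal_binary_bit_flip : Prop := ∀ (binary : Int), Dom_binary_bit_flip binary → Spec_binary_bit_flip binary (binary_bit_flip binary)

-- ===== LEMMAS AND PROOFS =====

/-- the character of bit `k` of `n` (for `0 ≤ n`) -/
def bitChar (n : Int) (k : Nat) : Char := if n / 2 ^ k % 2 = 1 then '1' else '0'

/-- the LSB-first digit list the while loop accumulates -/
def repL (n : Int) : List Char :=
  if h : n > 0 then bitChar n 0 :: repL (PySem.Int.floordiv n 2) else []
termination_by n.toNat
decreasing_by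
  rw [PySem.Int.floordiv_eq_ediv_of_pos (by omega)]
  omega

lemma convLoop_toList (n : Int) (s : String) :
    (convLoop n s).toList = s.toList ++ repL n := by
  induction n, s using convLoop.induct with
  | case1 n s h ih =>
      rw [convLoop, repL]
      simp only [dif_pos h]
      rw [ih]
      have h2 : PySem.Int.mod n 2 = n % 2 := PySem.Int.mod_eq_emod_of_pos (by omega)
      have : (PySem.Int.toStr (PySem.Int.mod n 2)).toList = [bitChar n 0] := by
        rw [h2]
        have : n % 2 = 0 ∨ n % 2 = 1 := by omega
        unfold bitChar
        rcases this with h0 | h0 <;> simp [h0] <;> decide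
      simp only [String.toList_append, this, List.append_assoc, List.singleton_append]
  | case2 n s h =>
      rw [convLoop, repL]
      simp [h]

lemma repL_pad_getD (n : Int) (hn : 0 ≤ n) (j : Nat) (hj : j < 8) :
    (repL n ++ List.replicate 8 '0').getD j 'x' = bitChar n j := by
  induction j generalizing n with
  | zero =>
      rw [repL]
      by_cases h : n > 0
      · simp [h]
      · have hn0 : n = 0 := by omega
        subst hn0
        simp [bitChar]
  | succ j ih =>
      rw [repL]
      by_cases h : n > 0
      · simp only [dif_pos h, List.cons_append, List.getD_cons_succ]
        rw [ih (PySem.Int.floordiv n 2) (by rw [PySem.Int.floordiv_eq_ediv_of_pos (by omega)]; omega) (by omega)]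
        rw [PySem.Int.floordiv_eq_ediv_of_pos (by omega)]
        unfold bitChar
        have : n / 2 / 2 ^ j = n / 2 ^ (j + 1) := by
          rw [Int.ediv_ediv_of_nonneg (by omega), pow_succ, mul_comm]
        rw [this]
      · simp only [dif_neg h, List.nil_append]
        unfold bitChar
        have hn0 : n = 0 := by omega
        subst hn0
        have hj7 : j < 7 := by omega
        interval_cases j <;> rfl

lemma repL_pad_take (n : Int) (hn : 0 ≤ n) :
    List.take 8 (repL n ++ List.replicate 8 '0') = (List.range 8).map (bitChar n) := by
  apply List.ext_getElem
  · simp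
  · intro i h1 h2
    have hi : i < 8 := by simpa using h2
    have hlen : i < (repL n ++ List.replicate 8 '0').length := by simp; omega
    have := repL_pad_getD n hn i hi
    rw [List.getD_eq_getElem _ _ hlen] at this
    simpa [hi] using this

def flipChar (c : Char) : Char := if c == '1' then '0' else '1'

lemma flipFold_toList (l : List Char) (acc : String) :
    (l.foldl
      (fun empty character => if character == '1' then empty ++ "0" else empty ++ "1")
      acc).toList = acc.toList ++ l.map flipChar := by
  induction l generalizing acc with
  | nil => simp
  | cons c t ih =>
      simp only [List.foldl_cons, List.map_cons]
      rw [ih]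
      unfold flipChar
      by_cases h : c == '1' <;> simp [h]

lemma binary_bit_flip_nonneg (n : Int) (hn : 0 ≤ n) :
    (binary_bit_flip n).toList =
      ((List.range 8).map (bitChar n)).reverse.map flipChar := by
  unfold binary_bit_flip convert_to_binary
  rw [flipFold_toList]
  simp only [String.toList_append, String.toList_ofList, List.reverse_reverse,
    List.reverse_append, List.nil_append]
  rw [convLoop_toList]
  simp only [String.toList_empty, List.nil_append]
  have hsl : PySem.List.slice ((repL n) ++ ("00000000".toList.reverse)) none (some 8)
      = List.take 8 ((repL n) ++ List.replicate 8 '0') := by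
    rw [show ((8 : Int)) = ((8 : Nat) : Int) by norm_num, PySem.List.slice_to_natCast]
    rfl
  rw [hsl, repL_pad_take n hn]

-- ===== VERDICT (by name: the statement is the Claim_ definition above) =====
theorem binary_bit_flip_spec : Claim_equal_binary_bit_flip := by
  intro n _
  unfold Spec_binary_bit_flip binary_bit_flip_alt
  by_cases hpos : n > 0
  · simp only [if_pos hpos]
    have hmod : PySem.Int.mod n 256 = n % 256 := PySem.Int.mod_eq_emod_of_pos (by omega)
    have hA := binary_bit_flip_nonneg n (le_of_lt hpos)
    rw [(String.ofList_toList (s := binary_bit_flip n)).symm, hA, hmod]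
    unfold fmt08b
    refine congrArg String.ofList ?_
    rw [show List.range 8 = [0,1,2,3,4,5,6,7] from rfl]
    simp only [List.map_cons, List.map_nil, List.reverse_cons, List.reverse_nil,
      List.nil_append, List.cons_append, List.cons.injEq, and_true]
    unfold bitChar flipChar
    refine ⟨?_, ?_, ?_, ?_, ?_, ?_, ?_, ?_⟩ <;>
      (split_ifs <;> first | rfl | (exfalso; omega) | simp_all)
  · simp only [if_neg hpos]
    have h0 : convLoop n "" = "" := by rw [convLoop]; simp [hpos]
    unfold binary_bit_flip convert_to_binary
    rw [h0]
    decide
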